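-- pv_equiv track=rewrite | github.com/JonatanHellgren/Kurser | AI_DIT728/module4/code_cp.py | get_following_word
-- ===== SOURCE A (Python) =====
-- def get_following_word(looking_for, mat):
--     followed_by = []
--     for line in mat:
--         for ind, word in enumerate(line):
--             if (looking_for == word):
--                 if ind < len(line) - 1:
--                     followed_by.append(line[ind + 1])
--                 else:
--                     followed_by.append('$')
--     return followed_by
-- ===== SOURCE B (Python) =====
-- def get_following_word(looking_for, mat):
--     # Build an index from every word to the list of words that follow it
--     # (with '$' when a word ends a line), then answer with one lookup.
--     index = {}
--     for line in mat:
--         for word, nxt in zip(line, line[1:] + ['$']):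
--             index.setdefault(word, []).append(nxt)
--     return index.get(looking_for, [])
-- ===== Notes on version B (the rewrite author's own statement) =====
-- stated objective: alternative
-- what changed: Instead of scanning for looking_for and appending its successors, B builds a dictionary grouping every word's successors (pad-and-zip supplies the '$' sentinel) and answers with a single dictionary lookup; A's per-word equality test and index arithmetic disappear.
import Mathlib
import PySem

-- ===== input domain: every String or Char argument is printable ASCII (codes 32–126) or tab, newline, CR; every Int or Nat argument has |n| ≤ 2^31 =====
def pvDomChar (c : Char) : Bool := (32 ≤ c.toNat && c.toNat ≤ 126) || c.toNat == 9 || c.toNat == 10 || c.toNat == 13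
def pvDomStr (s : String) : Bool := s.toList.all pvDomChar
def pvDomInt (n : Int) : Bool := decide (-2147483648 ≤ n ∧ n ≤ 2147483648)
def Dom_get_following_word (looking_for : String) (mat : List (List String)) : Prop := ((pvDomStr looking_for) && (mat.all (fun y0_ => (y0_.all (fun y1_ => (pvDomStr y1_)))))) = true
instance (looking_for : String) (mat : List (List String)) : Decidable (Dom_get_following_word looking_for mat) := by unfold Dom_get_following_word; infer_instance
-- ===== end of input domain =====

-- B builds a dictionary grouping EVERY word's successors ('$' when a word ends a line)
-- and answers with a single lookup, instead of A's scan comparing each word to looking_for.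

-- ===== PORT A =====
def get_following_word (looking_for : String) (mat : List (List String)) : List String :=
  mat.foldl (fun followed_by line =>
    (PySem.List.enumerate line).foldl (fun fb iw =>
      if looking_for == iw.2 then
        if iw.1 < (line.length : Int) - 1 then
          -- line[ind+1]: in-range here, pyGet? returns some; getD supplies the never-used default
          fb ++ [(PySem.List.pyGet? line (iw.1 + 1)).getD "$"]
        else
          fb ++ ["$"]
      else fb) followed_by) []

-- ===== PORT B =====
def get_following_word_alt (looking_for : String) (mat : List (List String)) : List String :=
  let index : PySem.Dict String (List String) :=
    mat.foldl (fun idx line =>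
      (line.zip (line.drop 1 ++ ["$"])).foldl (fun idx p =>
        -- index.setdefault(p.1, []).append(p.2)  ==  index[p.1] = index.get(p.1, []) + [p.2]
        idx.modify p.1 [] (· ++ [p.2])) idx) PySem.Dict.empty
  index.getD looking_for []

-- ===== PRECONDITION & SPEC =====
def Spec_get_following_word (looking_for : String) (mat : List (List String)) (out : List String) : Prop := out = get_following_word_alt looking_for mat
instance (looking_for : String) (mat : List (List String)) (out : List String) : Decidable (Spec_get_following_word looking_for mat out) := by unfold Spec_get_following_word; infer_instance

-- ===== CLAIM =====
def Claim_equal_get_following_word : Prop := ∀ (looking_for : String) (mat : List (List String)), Dom_get_following_word looking_for mat → Spec_get_following_word looking_for mat (get_following_word looking_for mat)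

-- ===== LEMMAS AND PROOFS =====

-- the successors of looking_for within one line, in order
def pvAltLine (looking_for : String) (line : List String) : List String :=
  ((line.zip (line.drop 1 ++ ["$"])).filter (fun p => p.1 == looking_for)).map (·.2)

-- A's inner loop over the suffix (L.drop s), enumerated from s, equals acc ++ pvAltLine of the suffix.
theorem pvInner (looking_for : String) (L : List String) :
    ∀ (t : List String) (s : Nat) (acc : List String), t = L.drop s →
    (PySem.List.enumerate t (s : Int)).foldl (fun fb iw =>
      if looking_for == iw.2 then
        if iw.1 < (L.length : Int) - 1 then
          fb ++ [(PySem.List.pyGet? L (iw.1 + 1)).getD "$"]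
        else
          fb ++ ["$"]
      else fb) acc = acc ++ pvAltLine looking_for t := by
  intro t
  induction t with
  | nil => intro s acc _; simp [PySem.List.enumerate, pvAltLine]
  | cons x r ih =>
    intro s acc ht
    have hlen : L.length = s + 1 + r.length := by
      have := congrArg List.length ht
      simp at this
      omega
    have hdrop : L.drop (s + 1) = r := by
      have : L.drop (s+1) = (L.drop s).drop 1 := by
        rw [List.drop_drop]
      rw [this, ← ht]
      simp
    rw [PySem.List.enumerate_cons]
    simp only [List.foldl_cons]
    have hstep : ∀ acc2 : List String,
        (if looking_for == x then
          if (s : Int) < (L.length : Int) - 1 then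
            acc2 ++ [(PySem.List.pyGet? L ((s : Int) + 1)).getD "$"]
          else acc2 ++ ["$"]
        else acc2)
        = acc2 ++ (if x == looking_for then [(r.head?).getD "$"] else []) := by
      intro acc2
      by_cases hx : looking_for = x
      · subst hx
        simp only [beq_self_eq_true, if_true]
        cases r with
        | nil =>
          have : ¬ ((s : Int) < (L.length : Int) - 1) := by
            simp only [List.length_nil] at hlen
            rw [hlen]; push_cast; omega
          simp [this]
        | cons y ys =>
          have hlt : (s : Int) < (L.length : Int) - 1 := by
            simp only [List.length_cons] at hlen
            rw [hlen]; push_cast; omega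
          have hget : PySem.List.pyGet? L ((s : Int) + 1) = some y := by
            have h1 : ((s : Int) + 1) = ((s + 1 : Nat) : Int) := by push_cast; ring
            rw [h1, PySem.List.pyGet?_natCast]
            have : L[s+1]? = (L.drop (s+1))[0]? := by
              simp [List.getElem?_drop]
            rw [this, hdrop]
            simp
          simp [hlt, hget]
      · have h1 : (looking_for == x) = false := beq_eq_false_iff_ne.mpr hx
        have h2 : (x == looking_for) = false := beq_eq_false_iff_ne.mpr (Ne.symm hx)
        simp [h1, h2]
    rw [hstep]
    have hcast : (s : Int) + 1 = ((s + 1 : Nat) : Int) := by push_cast; ring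
    rw [hcast, ih (s + 1) _ hdrop.symm]
    have halt : pvAltLine looking_for (x :: r)
        = (if x == looking_for then [(r.head?).getD "$"] else []) ++ pvAltLine looking_for r := by
      cases r with
      | nil => by_cases hx : (x == looking_for) <;> simp [pvAltLine, hx]
      | cons y ys =>
        by_cases hx : (x == looking_for) <;> simp [pvAltLine, hx]
    rw [halt, List.append_assoc]

-- A's outer loop
theorem pvOuter (looking_for : String) :
    ∀ (mat : List (List String)) (acc : List String),
    mat.foldl (fun followed_by line =>
      (PySem.List.enumerate line).foldl (fun fb iw =>
        if looking_for == iw.2 then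
          if iw.1 < (line.length : Int) - 1 then
            fb ++ [(PySem.List.pyGet? line (iw.1 + 1)).getD "$"]
          else
            fb ++ ["$"]
        else fb) followed_by) acc
    = acc ++ mat.flatMap (fun line => pvAltLine looking_for line) := by
  intro mat
  induction mat with
  | nil => intro acc; simp
  | cons line rest ih =>
    intro acc
    simp only [List.foldl_cons]
    have h0 : (PySem.List.enumerate line ((0 : Nat) : Int)).foldl (fun fb iw =>
        if looking_for == iw.2 then
          if iw.1 < (line.length : Int) - 1 then
            fb ++ [(PySem.List.pyGet? line (iw.1 + 1)).getD "$"]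
          else
            fb ++ ["$"]
        else fb) acc = acc ++ pvAltLine looking_for line :=
      pvInner looking_for line line 0 acc (by simp)
    simp only [Nat.cast_zero] at h0
    rw [h0, ih]
    simp [List.append_assoc]

-- B's dictionary build: the entry at looking_for collects exactly the matching successors, in order.
theorem pvIndexGetD (looking_for : String) :
    ∀ (mat : List (List String)) (d : PySem.Dict String (List String)),
    (mat.foldl (fun idx line =>
      (line.zip (line.drop 1 ++ ["$"])).foldl (fun idx p =>
        idx.modify p.1 [] (· ++ [p.2])) idx) d).getD looking_for []
    = d.getD looking_for [] ++ mat.flatMap (fun line => pvAltLine looking_for line) := by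
  intro mat
  induction mat with
  | nil => intro d; simp
  | cons line rest ih =>
    intro d
    simp only [List.foldl_cons, List.flatMap_cons]
    rw [ih, PySem.Dict.getD_foldl_modify_append]
    simp [pvAltLine, List.append_assoc]

-- ===== VERDICT =====
theorem get_following_word_spec : Claim_equal_get_following_word := by
  intro looking_for mat _
  unfold Spec_get_following_word get_following_word get_following_word_alt
  rw [pvOuter, pvIndexGetD]
  simp
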